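-- pv_equiv track=rewrite | github.com/paqui4ever/Algoritmos-y-Estructuras-de-Datos-I | Parciales Python/Parcial5.py | cuantos_sufijos_son_palindromos
-- ===== SOURCE A (Python) =====
-- def cuantos_sufijos_son_palindromos (texto: str) -> int:
--     contador: int = 0
--     texto_enlistado = split_homemade(texto)
--     for palabra in texto_enlistado:
--         palabra_partida = string_a_list_char(palabra)
--         for i in range (len(palabra_partida)):
--             if es_palindromo(palabra_partida):
--                 contador += 1
--             palabra_partida.pop()
--     return contador
--
-- def es_palindromo (sufijo: list[chr]) -> bool:
--     for i in range(len(sufijo) // 2):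
--         j = len(sufijo)-1-i
--         if sufijo[i] != sufijo[j]:
--             return False
--     return True
--
-- def split_homemade(texto: str) -> list[str]:
--     palabra: str = ""
--     palabras: list[str] = []
--     termino_palabra = None
--     for i in range(len(texto)):
--         if texto[i] != " " and texto[i] != "\n":
--             termino_palabra = True
--             palabra += texto[i]
--         elif texto[i] == " " or texto[i] == "\n":
--             termino_palabra = False
--             if termino_palabra == False:
--                 palabras.append(palabra)
--                 palabra = ""
--     if palabra != "":
--         palabras.append(palabra)
--     return palabras
--
-- def string_a_list_char (string: str) -> list[chr]:
--     res: list[chr] = []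
--     for letra in string:
--         res.append(letra)
--     return res
-- ===== SOURCE B (Python) =====
-- def cuantos_sufijos_son_palindromos(texto: str) -> int:
--     total = 0
--     for w in texto.replace("\n", " ").split(" "):
--         r = w[::-1]
--         n = len(w)
--         for k in range(1, n + 1):
--             if w[:k] == r[n - k:]:
--                 total += 1
--     return total
-- ===== Notes on version B (the rewrite author's own statement) =====
-- stated objective: simpler
-- what changed: Replaces the homemade character-loop split, the char-list copy with repeated pop(), and the index-based half-scan palindrome test by str.replace + str.split on a single space and direct slice comparisons of each prefix against the reversed word.
import Mathlib
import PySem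

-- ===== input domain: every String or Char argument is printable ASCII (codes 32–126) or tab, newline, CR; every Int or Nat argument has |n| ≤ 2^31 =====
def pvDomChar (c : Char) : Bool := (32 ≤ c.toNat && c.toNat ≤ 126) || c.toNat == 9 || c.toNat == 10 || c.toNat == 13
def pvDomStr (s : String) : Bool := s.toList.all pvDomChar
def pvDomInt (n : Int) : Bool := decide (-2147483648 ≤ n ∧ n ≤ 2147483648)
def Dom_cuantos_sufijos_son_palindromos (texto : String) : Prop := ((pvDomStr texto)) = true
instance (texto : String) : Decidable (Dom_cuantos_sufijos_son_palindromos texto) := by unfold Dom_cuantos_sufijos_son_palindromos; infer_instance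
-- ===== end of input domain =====

-- B replaces A's homemade character-loop split, char-list copy with repeated pop() and index half-scan
-- palindrome test by str.replace + str.split(" ") and slice comparisons of each prefix against the
-- reversed word (objective: simpler; same asymptotic cost).

-- ===== PORT A =====
-- split_homemade: character loop with the current word and the word list as accumulators;
-- the Python also carries 'termino_palabra' (None/True/False), kept here as an Option Bool.
def splitHomemade (texto : List Char) : List (List Char) :=
  let st := texto.foldl
    (fun (st : List Char × List (List Char) × Option Bool) c =>
      if c ≠ ' ' ∧ c ≠ '\n' then (st.1 ++ [c], st.2.1, some true)
      else if c = ' ' ∨ c = '\n' then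
        (if (some false : Option Bool) = some false then ([], st.2.1 ++ [st.1], some false)
         else (st.1, st.2.1, some false))
      else st)
    ([], [], none)
  if st.1 ≠ [] then st.2.1 ++ [st.1] else st.2.1

-- es_palindromo: index loop with early return; sufijo[i] and sufijo[len-1-i] are always in
-- range here, ported as getD.
def esPalindromo (sufijo : List Char) : Bool :=
  (List.range (sufijo.length / 2)).all
    (fun i => sufijo.getD i ' ' == sufijo.getD (sufijo.length - 1 - i) ' ')

-- string_a_list_char: append loop over the characters.
def stringAListChar (s : List Char) : List Char :=
  s.foldl (fun res c => res ++ [c]) []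

def cuantos_sufijos_son_palindromos (texto : String) : Int :=
  let textoEnlistado := splitHomemade texto.toList
  textoEnlistado.foldl
    (fun contador palabra =>
      let pp := stringAListChar palabra
      ((List.range pp.length).foldl
        (fun (st : Int × List Char) _ =>
          ((if esPalindromo st.2 then st.1 + 1 else st.1), st.2.dropLast))  -- .pop() on a list that is nonempty at every iteration = dropLast
        (contador, pp)).1)
    0

-- ===== PORT B =====
-- texto.replace("\n", " ").split(" ") = Chars.replace / Chars.splitOn (separator nonempty) on the
-- code points; w[::-1] = reverse (PySem.List.slice?_none_none_neg_one); w[:k], r[n-k:] = PySem slices.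
def cuantos_sufijos_son_palindromos_alt (texto : String) : Int :=
  (PySem.Chars.splitOn (PySem.Chars.replace texto.toList ['\n'] [' ']) [' ']).foldl
    (fun total w =>
      let r := w.reverse
      let n : Int := PySem.List.len w
      (PySem.List.pyRange 1 (n + 1) 1).foldl
        (fun t k =>
          if PySem.List.slice w none (some k) = PySem.List.slice r (some (n - k)) none then t + 1 else t)
        total)
    0

-- ===== PRECONDITION & SPEC =====
def Spec_cuantos_sufijos_son_palindromos (texto : String) (out : Int) : Prop := out = cuantos_sufijos_son_palindromos_alt texto
instance (texto : String) (out : Int) : Decidable (Spec_cuantos_sufijos_son_palindromos texto out) := by unfold Spec_cuantos_sufijos_son_palindromos; infer_instance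

-- ===== CLAIM (what is proved, stated in full; the proofs are below) =====
def Claim_equal_cuantos_sufijos_son_palindromos : Prop := ∀ (texto : String), Dom_cuantos_sufijos_son_palindromos texto → Spec_cuantos_sufijos_son_palindromos texto (cuantos_sufijos_son_palindromos texto)

-- ===== LEMMAS AND PROOFS =====

-- '\n' ↦ ' ', everything else fixed: the substitution replace("\n", " ") performs.
def subNl (c : Char) : Char := if c = '\n' then ' ' else c

-- the pieces str.split(" ") cuts a character list into (empty pieces included)
def pieces : List Char → List (List Char)
  | [] => [[]]
  | c :: cs => if c = ' ' then [] :: pieces cs else (pieces cs).modifyHead (c :: ·)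

def consHead (p : List Char) : List (List Char) → List (List Char)
  | [] => [p]
  | q :: qs => (p ++ q) :: qs

-- drop a final empty piece (split_homemade omits it, str.split(" ") keeps it)
def dropEmptyLast : List (List Char) → List (List Char)
  | [] => []
  | p :: ps => if ps = [] then (if p = [] then [] else [p]) else p :: dropEmptyLast ps

-- number of palindromic nonempty prefixes of w (the common specification)
def prefPal (w : List Char) : Int :=
  ((List.range w.length).countP (fun k => decide (w.take (k + 1) = (w.take (k + 1)).reverse)) : Int)

-- A's inner loop as an iterated step
def stepA (st : Int × List Char) : Int × List Char :=
  (if esPalindromo st.2 then st.1 + 1 else st.1, st.2.dropLast)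

def cntA : Nat → List Char → Int
  | 0, _ => 0
  | n + 1, w => (if esPalindromo w then 1 else 0) + cntA n w.dropLast

lemma stringAListChar_eq (s : List Char) : stringAListChar s = s := by
  unfold stringAListChar
  rw [PySem.List.foldl_append_singleton]
  simp

lemma esPalindromo_eq (l : List Char) : esPalindromo l = decide (l = l.reverse) := by
  have h : esPalindromo l = true ↔ l = l.reverse := by
    constructor
    · intro h
      simp only [esPalindromo, List.all_eq_true, List.mem_range] at h
      apply List.ext_getElem (by simp)
      intro i h1 h2
      rw [List.getElem_reverse]
      rcases Nat.lt_or_ge i (l.length / 2) with hi | hi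
      · have hh := h i hi
        rw [List.getD_eq_getElem _ _ h1, List.getD_eq_getElem _ _ (by omega), beq_iff_eq] at hh
        exact hh
      · rcases Nat.lt_or_ge (l.length - 1 - i) (l.length / 2) with hj | hj
        · have hh := h _ hj
          rw [List.getD_eq_getElem _ _ (by omega), List.getD_eq_getElem _ _ (by omega), beq_iff_eq] at hh
          have hij : l.length - 1 - (l.length - 1 - i) = i := by omega
          simp_rw [hij] at hh
          exact hh.symm
        · congr 1
          omega
    · intro h
      simp only [esPalindromo, List.all_eq_true, List.mem_range]
      intro i hi
      have h1 : i < l.length := by omega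
      have h2 : l.length - 1 - i < l.length := by omega
      rw [List.getD_eq_getElem _ _ h1, List.getD_eq_getElem _ _ h2, beq_iff_eq,
        List.getElem_of_eq h h1, List.getElem_reverse]
  by_cases hd : l = l.reverse
  · rw [decide_eq_true hd]
    exact h.mpr hd
  · rw [decide_eq_false hd]
    exact Bool.eq_false_iff.mpr (fun hb => hd (h.mp hb))

lemma foldl_const_iterate {α β : Type} (g : α → α) (l : List β) (s : α) :
    l.foldl (fun st _ => g st) s = g^[l.length] s := by
  induction l generalizing s with
  | nil => rfl
  | cons x xs ih => simp [List.foldl_cons, ih, Function.iterate_succ_apply]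

lemma iterA (n : Nat) (w : List Char) (cont : Int) :
    (stepA^[n] (cont, w)).1 = cont + cntA n w := by
  induction n generalizing w cont with
  | zero => simp [cntA]
  | succ n ih =>
      rw [Function.iterate_succ_apply]
      simp only [stepA, cntA, ih]
      split <;> ring

lemma cntA_eq (n : Nat) (w : List Char) (h : w.length = n) : cntA n w = prefPal w := by
  induction n generalizing w with
  | zero =>
      have hw : w = [] := List.eq_nil_of_length_eq_zero h
      simp [hw, cntA, prefPal]
  | succ n ih =>
      have hlen : w.dropLast.length = n := by simp [h]
      have hd : w.dropLast = w.take n := by rw [List.dropLast_eq_take, h]; simp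
      rw [cntA, ih _ hlen]
      unfold prefPal
      rw [hlen, h, List.range_succ, List.countP_append, List.countP_singleton]
      have h1 : List.countP
          (fun k => decide (w.dropLast.take (k + 1) = (w.dropLast.take (k + 1)).reverse))
          (List.range n) =
          List.countP (fun k => decide (w.take (k + 1) = (w.take (k + 1)).reverse))
          (List.range n) := by
        apply List.countP_congr
        intro k hk
        simp only [List.mem_range] at hk
        rw [hd, List.take_take, Nat.min_eq_left (by omega)]
      rw [h1]
      have h2 : w.take (n + 1) = w := List.take_of_length_le (by omega)
      simp only [h2, esPalindromo_eq]
      split_ifs <;> push_cast <;> ring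

lemma innerB_aux (w : List Char) (n : Nat) (hn : n ≤ w.length) (total : Int) :
    (PySem.List.pyRange 1 ((n : Int) + 1) 1).foldl
      (fun t k =>
        if PySem.List.slice w none (some k) =
            PySem.List.slice w.reverse (some ((w.length : Int) - k)) none then t + 1 else t)
      total
    = total +
      ((List.range n).countP (fun k => decide (w.take (k + 1) = (w.take (k + 1)).reverse)) : Int) := by
  induction n generalizing total with
  | zero => norm_num
  | succ n ih =>
      push_cast
      rw [PySem.List.pyRange_one_succ_right (by omega), List.foldl_append, List.foldl_cons,
        List.foldl_nil, ih (by omega), List.range_succ, List.countP_append, List.countP_singleton]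
      have e1 : PySem.List.slice w none (some ((n : Int) + 1)) = w.take (n + 1) := by
        rw [PySem.List.slice_to w (by omega)]
        congr 1
      have e2 : PySem.List.slice w.reverse (some ((w.length : Int) - ((n : Int) + 1))) none
          = (w.take (n + 1)).reverse := by
        rw [PySem.List.slice_from w.reverse (by omega), List.reverse_take]
        congr 1
        omega
      simp only [e1, e2, decide_eq_true_eq]
      split_ifs <;> push_cast <;> ring

lemma innerB_eq (w : List Char) (total : Int) :
    (PySem.List.pyRange 1 (PySem.List.len w + 1) 1).foldl
      (fun t k =>
        if PySem.List.slice w none (some k) =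
            PySem.List.slice w.reverse (some (PySem.List.len w - k)) none then t + 1 else t)
      total = total + prefPal w := by
  rw [PySem.List.len_eq]
  exact innerB_aux w w.length le_rfl total

lemma replace_go (cs : List Char) : ∀ (acc : List Char) (fuel : Nat), cs.length ≤ fuel →
    PySem.Chars.replace.go ['\n'] [' '] fuel cs acc = acc.reverse ++ cs.map subNl := by
  induction cs with
  | nil => intro acc fuel _; cases fuel <;> simp [PySem.Chars.replace.go]
  | cons c t ih =>
      intro acc fuel hf
      cases fuel with
      | zero => simp at hf
      | succ f =>
          rw [PySem.Chars.replace.go]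
          by_cases hc : c = '\n'
          · subst hc
            rw [if_pos (by simp [List.isPrefixOf])]
            have h2 := ih (' ' :: acc) f (by simpa using Nat.le_of_succ_le_succ hf)
            simpa [subNl, List.isPrefixOf] using h2
          · rw [if_neg (by simp [List.isPrefixOf, beq_iff_eq]; exact fun h => hc h.symm)]
            rw [ih (c :: acc) f (by simpa using Nat.le_of_succ_le_succ hf)]
            simp [subNl, hc]

lemma replace_eq (cs : List Char) :
    PySem.Chars.replace cs ['\n'] [' '] = cs.map subNl := by
  unfold PySem.Chars.replace
  rw [if_neg (by simp)]
  rw [replace_go cs [] cs.length le_rfl]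
  simp

lemma pieces_ne_nil (cs : List Char) : pieces cs ≠ [] := by
  cases cs with
  | nil => simp [pieces]
  | cons c t =>
      simp only [pieces]
      split
      · simp
      · cases h : pieces t with
        | nil => exact absurd h (pieces_ne_nil t)
        | cons q qs => simp [List.modifyHead]

lemma consHead_nil (ps : List (List Char)) (h : ps ≠ []) : consHead [] ps = ps := by
  cases ps with
  | nil => exact absurd rfl h
  | cons q qs => simp [consHead]

lemma consHead_modifyHead (p : List Char) (c : Char) (ps : List (List Char)) (h : ps ≠ []) :
    consHead p (ps.modifyHead (c :: ·)) = consHead (p ++ [c]) ps := by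
  cases ps with
  | nil => exact absurd rfl h
  | cons q qs => simp [consHead, List.modifyHead]

lemma splitOn_go (cs : List Char) : ∀ (cur : List Char) (acc : List (List Char)) (fuel : Nat),
    cs.length ≤ fuel →
    PySem.Chars.splitOn.go [' '] fuel cs cur acc = acc.reverse ++ consHead cur.reverse (pieces cs) := by
  induction cs with
  | nil =>
      intro cur acc fuel _
      cases fuel <;> simp [PySem.Chars.splitOn.go, pieces, consHead]
  | cons c t ih =>
      intro cur acc fuel hf
      cases fuel with
      | zero => simp at hf
      | succ f =>
          rw [PySem.Chars.splitOn.go]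
          by_cases hc : c = ' '
          · subst hc
            rw [if_pos (by simp [List.isPrefixOf])]
            have h2 := ih [] (cur.reverse :: acc) f (by simpa using Nat.le_of_succ_le_succ hf)
            simp only [List.reverse_nil] at h2
            rw [consHead_nil _ (pieces_ne_nil t)] at h2
            simpa [pieces, consHead, List.isPrefixOf] using h2
          · rw [if_neg (by simp [List.isPrefixOf, beq_iff_eq]; exact fun h => hc h.symm)]
            rw [ih (c :: cur) acc f (by simpa using Nat.le_of_succ_le_succ hf)]
            simp only [pieces, if_neg hc]
            rw [consHead_modifyHead _ _ _ (pieces_ne_nil t)]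
            simp

lemma splitOn_eq (ds : List Char) :
    PySem.Chars.splitOn ds [' '] = pieces ds := by
  unfold PySem.Chars.splitOn
  rw [splitOn_go ds [] [] (ds.length + 1) (by omega)]
  simp [consHead_nil _ (pieces_ne_nil ds)]

-- the loop body of split_homemade, named so the invariant proof can step it
def stepS (st : List Char × List (List Char) × Option Bool) (c : Char) :
    List Char × List (List Char) × Option Bool :=
  if c ≠ ' ' ∧ c ≠ '\n' then (st.1 ++ [c], st.2.1, some true)
  else if c = ' ' ∨ c = '\n' then
    (if (some false : Option Bool) = some false then ([], st.2.1 ++ [st.1], some false)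
     else (st.1, st.2.1, some false))
  else st

lemma stepS_word (st : List Char × List (List Char) × Option Bool) (c : Char)
    (h : c ≠ ' ' ∧ c ≠ '\n') : stepS st c = (st.1 ++ [c], st.2.1, some true) := by
  simp [stepS, h.1, h.2]

lemma stepS_sep (st : List Char × List (List Char) × Option Bool) (c : Char)
    (h1 : ¬(c ≠ ' ' ∧ c ≠ '\n')) (h2 : c = ' ' ∨ c = '\n') :
    stepS st c = ([], st.2.1 ++ [st.1], some false) := by
  simp [stepS, h1, h2]

lemma splitHomemade_inv (cs : List Char) : ∀ (palabra : List Char) (palabras : List (List Char))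
    (t : Option Bool),
    (if (cs.foldl stepS (palabra, palabras, t)).1 ≠ [] then
       (cs.foldl stepS (palabra, palabras, t)).2.1 ++ [(cs.foldl stepS (palabra, palabras, t)).1]
     else (cs.foldl stepS (palabra, palabras, t)).2.1)
      = palabras ++ dropEmptyLast (consHead palabra (pieces (cs.map subNl))) := by
  induction cs with
  | nil =>
      intro palabra palabras t
      simp only [List.foldl_nil, List.map_nil, pieces, consHead, List.append_nil]
      by_cases hp : palabra = []
      · simp [hp, dropEmptyLast]
      · simp [hp, dropEmptyLast]
  | cons c rest ih =>
      intro palabra palabras t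
      by_cases h1 : c ≠ ' ' ∧ c ≠ '\n'
      · simp only [List.foldl_cons, stepS_word _ c h1]
        rw [ih (palabra ++ [c]) palabras (some true)]
        have hsub : subNl c = c := by simp [subNl, h1.2]
        simp only [List.map_cons, hsub, pieces, if_neg h1.1]
        rw [consHead_modifyHead _ _ _ (pieces_ne_nil _)]
      · have h2 : c = ' ' ∨ c = '\n' := by tauto
        simp only [List.foldl_cons, stepS_sep _ c h1 h2]
        rw [ih [] (palabras ++ [palabra]) (some false)]
        have hsub : subNl c = ' ' := by
          rcases h2 with h | h <;> simp [h, subNl]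
        simp only [List.map_cons, hsub, pieces]
        rw [consHead_nil _ (pieces_ne_nil _)]
        have hne := pieces_ne_nil (rest.map subNl)
        cases hps : pieces (rest.map subNl) with
        | nil => exact absurd hps hne
        | cons q qs =>
            simp [consHead, dropEmptyLast]

lemma splitHomemade_eq (cs : List Char) :
    splitHomemade cs = dropEmptyLast (pieces (cs.map subNl)) := by
  have h := splitHomemade_inv cs [] [] none
  rw [consHead_nil _ (pieces_ne_nil _)] at h
  simp only [List.nil_append] at h
  exact h

lemma sum_dropEmptyLast (ps : List (List Char)) :
    ((dropEmptyLast ps).map prefPal).sum = (ps.map prefPal).sum := by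
  induction ps with
  | nil => rfl
  | cons p ps ih =>
      by_cases hps : ps = []
      · subst hps
        by_cases hp : p = []
        · simp [dropEmptyLast, hp, prefPal]
        · simp [dropEmptyLast, hp]
      · simp only [dropEmptyLast, if_neg hps, List.map_cons, List.sum_cons, ih]

lemma innerA_eq (cont : Int) (palabra : List Char) :
    ((List.range (stringAListChar palabra).length).foldl
      (fun (st : Int × List Char) _ =>
        ((if esPalindromo st.2 then st.1 + 1 else st.1), st.2.dropLast))
      (cont, stringAListChar palabra)).1 = cont + prefPal palabra := by
  rw [stringAListChar_eq]
  rw [show (fun (st : Int × List Char) (_ : Nat) =>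
      ((if esPalindromo st.2 then st.1 + 1 else st.1), st.2.dropLast)) =
      (fun st _ => stepA st) from rfl]
  rw [foldl_const_iterate stepA, List.length_range, iterA, cntA_eq _ _ rfl]

-- ===== VERDICT (by name: the statement is the Claim_ definition above) =====
theorem cuantos_sufijos_son_palindromos_spec : Claim_equal_cuantos_sufijos_son_palindromos := by
  unfold Claim_equal_cuantos_sufijos_son_palindromos
  intro texto _
  unfold Spec_cuantos_sufijos_son_palindromos
  have hA : cuantos_sufijos_son_palindromos texto
      = ((splitHomemade texto.toList).map prefPal).sum := by
    show (splitHomemade texto.toList).foldl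
        (fun contador palabra =>
          ((List.range (stringAListChar palabra).length).foldl
            (fun (st : Int × List Char) _ =>
              ((if esPalindromo st.2 then st.1 + 1 else st.1), st.2.dropLast))
            (contador, stringAListChar palabra)).1)
        0 = _
    rw [List.foldl_ext _ (fun (cont : Int) w => cont + prefPal w) 0
        (fun cont w _ => innerA_eq cont w), PySem.List.foldl_add]
    simp
  have hB : cuantos_sufijos_son_palindromos_alt texto
      = ((pieces (texto.toList.map subNl)).map prefPal).sum := by
    show (PySem.Chars.splitOn (PySem.Chars.replace texto.toList ['\n'] [' ']) [' ']).foldl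
        (fun total w =>
          (PySem.List.pyRange 1 (PySem.List.len w + 1) 1).foldl
            (fun t k =>
              if PySem.List.slice w none (some k) =
                  PySem.List.slice w.reverse (some (PySem.List.len w - k)) none then t + 1 else t)
            total)
        0 = _
    rw [replace_eq, splitOn_eq,
      List.foldl_ext _ (fun (total : Int) w => total + prefPal w) 0
        (fun total w _ => innerB_eq w total), PySem.List.foldl_add]
    simp
  rw [hA, hB, splitHomemade_eq, sum_dropEmptyLast]
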